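-- pv_equiv track=rewrite | github.com/DrekkSama/sc2-replay-parser | tests/test_zerg_rush_benchmark.py | get_minerals_at_frame
-- ===== SOURCE A (Python) =====
-- def get_raw_stats(data: dict, player_id: str = "1") -> list[dict]:
--     """Get raw player stats events."""
--     return data.get("raw_stats_events", {}).get(player_id, [])
--
-- def get_minerals_at_frame(data: dict, player_id: str, frame: int) -> int:
--     """Get minerals at the closest stats event to a given frame."""
--     stats = get_raw_stats(data, player_id)
--     best = None
--     best_dist = float("inf")
--     for s in stats:
--         dist = abs(s["frame"] - frame)
--         if dist < best_dist and s["frame"] <= frame: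
--             best_dist = dist
--             best = s
--     return best["minerals"] if best else 0
-- ===== SOURCE B (Python) =====
-- def get_raw_stats(data: dict, player_id: str = "1") -> list[dict]:
--     """Get raw player stats events."""
--     return data.get("raw_stats_events", {}).get(player_id, [])
--
-- def get_minerals_at_frame(data: dict, player_id: str, frame: int) -> int:
--     """Get minerals at the closest stats event to a given frame.
--
--     Among the events at or before `frame`, the closest one is simply the one
--     with the largest frame (first such on ties) - so filter, then max by frame.
--     """
--     eligible = [s for s in get_raw_stats(data, player_id) if s["frame"] <= frame]
--     best = max(eligible, key=lambda s: s["frame"], default=None)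
--     return best["minerals"] if best is not None else 0
-- ===== Notes on version B (the rewrite author's own statement) =====
-- stated objective: idiomatic
-- what changed: Replaces the manual loop that tracks a best event and a best |distance| by a filter of the events at or before the frame followed by max(..., key=frame): minimizing distance among events <= frame is maximizing the frame, and Python's max keeps the first maximal element exactly like A's strict-improvement update.
import Mathlib
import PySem

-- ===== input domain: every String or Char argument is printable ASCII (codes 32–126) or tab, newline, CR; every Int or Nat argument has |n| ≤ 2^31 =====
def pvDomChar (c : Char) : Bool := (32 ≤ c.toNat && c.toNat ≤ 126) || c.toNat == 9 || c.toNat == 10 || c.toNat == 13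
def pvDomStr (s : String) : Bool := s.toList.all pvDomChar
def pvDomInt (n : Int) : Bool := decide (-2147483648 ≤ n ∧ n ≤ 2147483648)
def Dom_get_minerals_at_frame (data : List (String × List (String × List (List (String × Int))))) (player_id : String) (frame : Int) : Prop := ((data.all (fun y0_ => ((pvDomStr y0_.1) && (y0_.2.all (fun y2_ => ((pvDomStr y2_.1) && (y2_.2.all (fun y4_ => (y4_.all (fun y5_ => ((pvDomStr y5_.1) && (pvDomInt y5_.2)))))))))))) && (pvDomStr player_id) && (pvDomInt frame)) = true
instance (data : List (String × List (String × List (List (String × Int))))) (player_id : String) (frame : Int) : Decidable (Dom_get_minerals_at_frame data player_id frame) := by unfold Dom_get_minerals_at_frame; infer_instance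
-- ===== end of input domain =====

-- B replaces A's manual best/best-distance loop by filter (frame ≤ target) + max-by-frame; idiomatic, same O(n) cost.

-- ===== PORT A =====
-- helper of the Python module, used by both A and B: data.get("raw_stats_events", {}).get(player_id, [])
def get_raw_stats (data : List (String × List (String × List (List (String × Int))))) (player_id : String) : List (List (String × Int)) :=
  PySem.Dict.getD ⟨PySem.Dict.getD ⟨data⟩ "raw_stats_events" []⟩ player_id []

-- s["frame"] / best["minerals"] as total lookups: exact under Pre_ (the key is present)
def pvFrameOf (s : List (String × Int)) : Int := PySem.Dict.getD ⟨s⟩ "frame" 0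

-- A's for-loop over stats, carrying best (None at start) and best_dist (None plays float("inf"))
def pvLoopA (frame : Int) : List (List (String × Int)) → Option (List (String × Int)) → Option Int → Option (List (String × Int))
  | [], best, _ => best
  | s :: rest, best, bestDist =>
      let dist := |pvFrameOf s - frame|
      if ((match bestDist with | none => true | some bd => decide (dist < bd)) && decide (pvFrameOf s ≤ frame)) then
        pvLoopA frame rest (some s) (some dist)
      else
        pvLoopA frame rest best bestDist

def get_minerals_at_frame (data : List (String × List (String × List (List (String × Int))))) (player_id : String) (frame : Int) : Int :=
  let stats := get_raw_stats data player_id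
  match pvLoopA frame stats none none with
  | some best => if best.isEmpty then 0 else PySem.Dict.getD ⟨best⟩ "minerals" 0   -- "best['minerals'] if best else 0" (empty dict is falsy)
  | none => 0

-- ===== PORT B =====
def get_minerals_at_frame_alt (data : List (String × List (String × List (List (String × Int))))) (player_id : String) (frame : Int) : Int :=
  let eligible := (get_raw_stats data player_id).filter (fun s => decide (pvFrameOf s ≤ frame))
  match PySem.List.max? eligible (fun s => pvFrameOf s) with
  | some best => PySem.Dict.getD ⟨best⟩ "minerals" 0
  | none => 0

-- ===== PRECONDITION & SPEC =====
-- Pre_ requires every stats event dict to carry the keys "frame" and "minerals": a missing "frame" (or a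
-- missing "minerals" on the selected event) makes Python A raise KeyError; for simplicity this also excludes
-- a missing "minerals" on an unselected event, where A returns and B returns the same value (see cites).
def Pre_get_minerals_at_frame (data : List (String × List (String × List (List (String × Int))))) (player_id : String) (frame : Int) : Prop :=
  ∀ s ∈ PySem.Dict.getD (⟨PySem.Dict.getD ⟨data⟩ "raw_stats_events" []⟩ : PySem.Dict String (List (List (String × Int)))) player_id [],
    (PySem.Dict.get? ⟨s⟩ "frame").isSome = true ∧ (PySem.Dict.get? ⟨s⟩ "minerals").isSome = true
instance (data : List (String × List (String × List (List (String × Int))))) (player_id : String) (frame : Int) : Decidable (Pre_get_minerals_at_frame data player_id frame) := by unfold Pre_get_minerals_at_frame; infer_instance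

def pvWitness_get_minerals_at_frame : (List (String × List (String × List (List (String × Int))))) × String × Int :=
  ([("raw_stats_events", [("1", [[("frame", 10), ("minerals", 50)], [("frame", 20), ("minerals", 80)]])])], "1", 15)

def Spec_get_minerals_at_frame (data : List (String × List (String × List (List (String × Int))))) (player_id : String) (frame : Int) (out : Int) : Prop := out = get_minerals_at_frame_alt data player_id frame
instance (data : List (String × List (String × List (List (String × Int))))) (player_id : String) (frame : Int) (out : Int) : Decidable (Spec_get_minerals_at_frame data player_id frame out) := by unfold Spec_get_minerals_at_frame; infer_instance

-- ===== CLAIM (what is proved, stated in full; the proofs are below) =====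
def Claim_equal_get_minerals_at_frame : Prop := ∀ (data : List (String × List (String × List (List (String × Int))))) (player_id : String) (frame : Int), Dom_get_minerals_at_frame data player_id frame → Pre_get_minerals_at_frame data player_id frame → Spec_get_minerals_at_frame data player_id frame (get_minerals_at_frame data player_id frame)

-- ===== LEMMAS AND PROOFS =====

-- Coupling between A's loop state and B's max?: A's state (some b, some (frame - key b)) over the rest of
-- the list computes exactly max? of b prepended to the eligible rest.
lemma pvLoopA_couples (frame : Int) :
    ∀ (l : List (List (String × Int))) (acc : Option (List (String × Int))),
      (∀ b, acc = some b → pvFrameOf b ≤ frame) →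
      pvLoopA frame l acc (acc.map (fun b => |pvFrameOf b - frame|))
        = PySem.List.max? (acc.toList ++ l.filter (fun s => decide (pvFrameOf s ≤ frame)))
            (fun s => pvFrameOf s) := by
  intro l
  induction l with
  | nil =>
    intro acc _
    cases acc with
    | none => simp [pvLoopA, PySem.List.max?]
    | some b => simp [pvLoopA, PySem.List.max?]
  | cons s rest ih =>
    intro acc hacc
    by_cases hs : pvFrameOf s ≤ frame
    · cases acc with
      | none =>
        simp only [pvLoopA]
        split_ifs with hcond
        · have := ih (some s) (by intro b hb; cases hb; exact hs)
          simpa [List.filter_cons, hs] using this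
        · exact absurd (by simp [hs]) hcond
      | some b =>
        have hb : pvFrameOf b ≤ frame := hacc b rfl
        have habs_b : |pvFrameOf b - frame| = frame - pvFrameOf b := by
          rw [abs_of_nonpos (by omega)]; ring
        have habs_s : |pvFrameOf s - frame| = frame - pvFrameOf s := by
          rw [abs_of_nonpos (by omega)]; ring
        simp only [pvLoopA]
        split_ifs with hcond
        · -- strict improvement: both sides switch to s
          have hlt : pvFrameOf b < pvFrameOf s := by
            simp [habs_b, habs_s] at hcond; omega
          have := ih (some s) (by intro b' hb'; cases hb'; exact hs)
          simp only [Option.map_some, Option.toList_some, List.singleton_append] at this ⊢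
          rw [this, List.filter_cons, if_pos (by simpa using hs)]
          simp [PySem.List.max?, hlt]
        · -- no improvement: both sides keep b
          have hge : ¬ pvFrameOf b < pvFrameOf s := by
            simp [habs_b, habs_s, hs] at hcond; omega
          have := ih (some b) (by intro b' hb'; cases hb'; exact hb)
          simp only [Option.map_some, Option.toList_some, List.singleton_append] at this ⊢
          rw [this, List.filter_cons, if_pos (by simpa using hs)]
          simp [PySem.List.max?, hge]
    · -- s is not eligible: neither side keeps it
      have hfilter : List.filter (fun s => decide (pvFrameOf s ≤ frame)) (s :: rest)
          = List.filter (fun s => decide (pvFrameOf s ≤ frame)) rest := by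
        rw [List.filter_cons, if_neg (by simpa using hs)]
      cases acc with
      | none =>
        simp only [pvLoopA]
        split_ifs with hcond
        · exact absurd hcond (by simp [hs])
        · rw [hfilter]; exact ih none hacc
      | some b =>
        simp only [pvLoopA]
        split_ifs with hcond
        · exact absurd hcond (by simp [hs])
        · rw [hfilter]; exact ih (some b) hacc

lemma pvLoopA_eq_max? (frame : Int) (l : List (List (String × Int))) :
    pvLoopA frame l none none
      = PySem.List.max? (l.filter (fun s => decide (pvFrameOf s ≤ frame))) (fun s => pvFrameOf s) := by
  have := pvLoopA_couples frame l none (by intro b hb; cases hb)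
  simpa using this

lemma pvGetD_minerals_nil : PySem.Dict.getD (⟨[]⟩ : PySem.Dict String Int) "minerals" 0 = 0 := by
  decide

-- ===== VERDICT (by name: the statement is the Claim_ definition above) =====
theorem get_minerals_at_frame_spec : Claim_equal_get_minerals_at_frame := by
  intro data player_id frame _ _
  unfold Spec_get_minerals_at_frame get_minerals_at_frame get_minerals_at_frame_alt
  simp only [pvLoopA_eq_max?]
  cases h : PySem.List.max? ((get_raw_stats data player_id).filter (fun s => decide (pvFrameOf s ≤ frame))) (fun s => pvFrameOf s) with
  | none => rfl
  | some best =>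
    cases best with
    | nil => simp [List.isEmpty, pvGetD_minerals_nil]
    | cons p t => simp [List.isEmpty]
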